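-- pv_equiv track=rewrite | github.com/MARELLASUSANNA/TravelViz | app.py | get_user_badge
-- ===== SOURCE A (Python) =====
-- from typing import Optional, Tuple
--
-- def get_user_badge(trip_count: int) -> Tuple[str, int, Optional[int]]:
--     tiers = [
--         ("New Traveler", 0),
--         ("Explorer", 1),
--         ("Adventurer", 3),
--         ("Globetrotter", 6),
--         ("World Citizen", 10),
--     ]
--     current_badge = tiers[0][0]
--     level_index = 0
--     next_threshold = tiers[1][1]
--
--     for i in range(len(tiers)):
--         name, threshold = tiers[i]
--         if trip_count >= threshold:
--             current_badge = name
--             level_index = i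
--             next_threshold = tiers[i + 1][1] if i + 1 < len(tiers) else None
--         else:
--             break
--     return current_badge, level_index, next_threshold
-- ===== SOURCE B (Python) =====
-- from typing import Optional, Tuple
-- from bisect import bisect_right
--
-- _TIER_NAMES = ["New Traveler", "Explorer", "Adventurer", "Globetrotter", "World Citizen"]
-- _THRESHOLDS = [0, 1, 3, 6, 10]
--
-- def get_user_badge(trip_count: int) -> Tuple[str, int, Optional[int]]:
--     level_index = max(bisect_right(_THRESHOLDS, trip_count) - 1, 0)
--     next_threshold = _THRESHOLDS[level_index + 1] if level_index + 1 < len(_THRESHOLDS) else None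
--     return _TIER_NAMES[level_index], level_index, next_threshold
-- ===== Notes on version B (the rewrite author's own statement) =====
-- stated objective: idiomatic
-- what changed: Replaces the linear scan-with-break over the tier list by bisect_right binary search on a precomputed sorted thresholds list, clamping the index to the lowest tier for counts below the first threshold.
import Mathlib
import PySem

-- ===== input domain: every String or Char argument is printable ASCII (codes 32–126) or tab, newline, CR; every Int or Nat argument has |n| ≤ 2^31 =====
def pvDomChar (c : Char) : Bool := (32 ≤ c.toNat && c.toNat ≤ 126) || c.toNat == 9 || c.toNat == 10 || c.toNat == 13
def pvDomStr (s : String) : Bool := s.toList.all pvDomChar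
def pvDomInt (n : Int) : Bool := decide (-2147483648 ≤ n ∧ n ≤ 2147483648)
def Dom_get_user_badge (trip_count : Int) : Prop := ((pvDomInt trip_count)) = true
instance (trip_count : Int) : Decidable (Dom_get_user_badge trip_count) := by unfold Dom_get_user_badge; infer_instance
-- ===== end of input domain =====

-- B replaces A's linear scan-with-break over the tiers by a bisect_right binary search
-- on the precomputed threshold list (idiomatic; same result for every int, incl. negatives).

-- ===== PORT A =====
def pvTiers : List (String × Int) :=
  [("New Traveler", 0), ("Explorer", 1), ("Adventurer", 3), ("Globetrotter", 6), ("World Citizen", 10)]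

-- A's 'for i in range(len(tiers))' with an early break, carrying the mutable
-- state (current_badge, level_index, next_threshold); the remaining indexed
-- tiers stand for the remaining range values i.
def pvLoopA (trip_count : Int) : List (Int × String × Int) → (String × Int × Option Int) → (String × Int × Option Int)
  | [], st => st
  | (i, name, threshold) :: rest, st =>
    if trip_count ≥ threshold then
      let nt : Option Int :=
        if i + 1 < (pvTiers.length : Int) then some ((pvTiers.getD (i+1).toNat ("", 0)).2) else none
      pvLoopA trip_count rest (name, i, nt)
    else st  -- break

def get_user_badge (trip_count : Int) : String × Int × Option Int :=
  pvLoopA trip_count (PySem.List.enumerate pvTiers)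
    ((pvTiers.getD 0 ("", 0)).1, 0, some ((pvTiers.getD 1 ("", 0)).2))

-- ===== PORT B =====
def pvTierNames : List String :=
  ["New Traveler", "Explorer", "Adventurer", "Globetrotter", "World Citizen"]
def pvThresholds : List Int := [0, 1, 3, 6, 10]

-- port of Python's bisect.bisect_right (stdlib binary search), fuel = list length
def pvBisectRight (xs : List Int) (x : Int) : Nat → Nat → Nat → Nat
  | 0, lo, _ => lo
  | fuel + 1, lo, hi =>
    if lo < hi then
      let mid := (lo + hi) / 2
      if x < xs.getD mid 0 then pvBisectRight xs x fuel lo mid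
      else pvBisectRight xs x fuel (mid + 1) hi
    else lo

def get_user_badge_alt (trip_count : Int) : String × Int × Option Int :=
  let b := pvBisectRight pvThresholds trip_count pvThresholds.length 0 pvThresholds.length
  let level_index : Nat := b - 1   -- max(b-1, 0): Nat subtraction clamps at 0 exactly like Python's max
  let next_threshold : Option Int :=
    if level_index + 1 < pvThresholds.length then some (pvThresholds.getD (level_index + 1) 0)
    else none
  (pvTierNames.getD level_index "", (level_index : Int), next_threshold)

-- ===== PRECONDITION & SPEC =====
def Spec_get_user_badge (trip_count : Int) (out : String × Int × Option Int) : Prop := out = get_user_badge_alt trip_count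
instance (trip_count : Int) (out : String × Int × Option Int) : Decidable (Spec_get_user_badge trip_count out) := by unfold Spec_get_user_badge; infer_instance

-- ===== CLAIM (what is proved, stated in full; the proofs are below) =====
def Claim_equal_get_user_badge : Prop := ∀ (trip_count : Int), Dom_get_user_badge trip_count → Spec_get_user_badge trip_count (get_user_badge trip_count)

-- ===== LEMMAS AND PROOFS =====

-- ===== VERDICT (by name: the statement is the Claim_ definition above) =====
theorem get_user_badge_spec : Claim_equal_get_user_badge := by
  intro t _
  unfold Spec_get_user_badge get_user_badge get_user_badge_alt
  simp only [pvTiers, pvThresholds, pvTierNames, PySem.List.enumerate_cons,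
    PySem.List.enumerate_nil, pvLoopA, pvBisectRight, List.getD, List.length]
  norm_num
  split_ifs <;> first | rfl | omega
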